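-- pv_equiv track=rewrite | github.com/cage-challenge/cage-challenge-4 | commtest.py | _check_files
-- ===== SOURCE A (Python) =====
-- def _check_files(file_events: dict) -> int:
--     '''
--     Checks if a file is created in the event. Currently, these are the only possible values:
--     - cmd.{extension} is a user-level compromise
--     - escalate.{extension} is an admin-level compromise
--
--     param: file_events: dict - the events to check
--
--     return: int - 0 if no indicator of compromise, 1 if user compromise, 2 if admin compromise
--     '''
--     compromise_level = 0
--     ioc_files_user = ['cmd.sh, cmd.exe']
--     ioc_files_admin = ['escalate.sh, escalate.exe']
--     for file in file_events:
--         if file['Filename'] in ioc_files_admin: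
--             compromise_level = 3
--             break
--         if file['Filename'] in ioc_files_user:
--             compromise_level = 2
--     return compromise_level
-- ===== SOURCE B (Python) =====
-- def _check_files(file_events: dict) -> int:
--     ioc_files_user = ['cmd.sh, cmd.exe']
--     ioc_files_admin = ['escalate.sh, escalate.exe']
--     if any(file['Filename'] in ioc_files_admin for file in file_events):
--         return 3
--     if any(file['Filename'] in ioc_files_user for file in file_events):
--         return 2
--     return 0
-- ===== Notes on version B (the rewrite author's own statement) =====
-- stated objective: simpler
-- what changed: Replaced the single stateful loop (mutable compromise_level, break) with two short-circuiting existence scans: return 3 if any event's Filename is an admin IoC, else 2 if any is a user IoC, else 0; the buggy single-element list literals are kept verbatim.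
import Mathlib
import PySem

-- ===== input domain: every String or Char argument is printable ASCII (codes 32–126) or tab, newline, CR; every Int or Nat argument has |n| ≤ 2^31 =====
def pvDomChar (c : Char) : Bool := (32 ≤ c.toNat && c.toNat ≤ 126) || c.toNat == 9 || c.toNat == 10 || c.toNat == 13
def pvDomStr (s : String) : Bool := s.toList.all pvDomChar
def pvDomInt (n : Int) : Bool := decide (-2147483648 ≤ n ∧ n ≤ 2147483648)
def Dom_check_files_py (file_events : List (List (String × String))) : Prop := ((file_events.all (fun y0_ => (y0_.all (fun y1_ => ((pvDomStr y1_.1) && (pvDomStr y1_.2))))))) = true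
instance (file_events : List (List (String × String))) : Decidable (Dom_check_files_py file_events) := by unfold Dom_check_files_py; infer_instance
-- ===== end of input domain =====

-- B replaces A's stateful loop (mutable compromise_level + break) by two short-circuiting
-- existence scans (any admin match → 3, else any user match → 2, else 0): simpler decomposition.


-- event['Filename']: first-match lookup in the association list (Python dict lookup);
-- none = KeyError (excluded by Pre_)
def pvLookupFilename (e : List (String × String)) : Option String :=
  (e.find? (fun p => p.1 == "Filename")).map (·.2)

-- ===== PORT A =====
-- the loop: mutable compromise_level, break on admin match; `0` on the none branch is
-- unreachable under Pre_ (Python raises KeyError there)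
def pvALoop : List (List (String × String)) → Int → Int
  | [], acc => acc
  | e :: rest, acc =>
    match pvLookupFilename e with
    | none => 0
    | some f =>
      if f ∈ ["escalate.sh, escalate.exe"] then 3
      else if f ∈ ["cmd.sh, cmd.exe"] then pvALoop rest 2
      else pvALoop rest acc

def check_files_py (file_events : List (List (String × String))) : Int :=
  pvALoop file_events 0

-- ===== PORT B =====
def pvIsAdmin (e : List (String × String)) : Bool :=
  match pvLookupFilename e with
  | some f => f == "escalate.sh, escalate.exe"
  | none => false

def pvIsUser (e : List (String × String)) : Bool :=
  match pvLookupFilename e with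
  | some f => f == "cmd.sh, cmd.exe"
  | none => false

def check_files_py_alt (file_events : List (List (String × String))) : Int :=
  if file_events.any pvIsAdmin then 3
  else if file_events.any pvIsUser then 2
  else 0

-- ===== PRECONDITION & SPEC =====
-- Pre_ excludes events without a 'Filename' key, on which both A and B raise KeyError.
def Pre_check_files_py (file_events : List (List (String × String))) : Prop :=
  ∀ e ∈ file_events, (pvLookupFilename e).isSome = true
instance (file_events : List (List (String × String))) : Decidable (Pre_check_files_py file_events) := by unfold Pre_check_files_py; infer_instance

def pvWitness_check_files_py : (List (List (String × String))) :=
  [[("Filename", "cmd.sh, cmd.exe")], [("Filename", "readme.txt")]]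

def Spec_check_files_py (file_events : List (List (String × String))) (out : Int) : Prop := out = check_files_py_alt file_events
instance (file_events : List (List (String × String))) (out : Int) : Decidable (Spec_check_files_py file_events out) := by unfold Spec_check_files_py; infer_instance

-- ===== CLAIM (what is proved, stated in full; the proofs are below) =====
def Claim_equal_check_files_py : Prop := ∀ (file_events : List (List (String × String))), Dom_check_files_py file_events → Pre_check_files_py file_events → Spec_check_files_py file_events (check_files_py file_events)

-- ===== LEMMAS AND PROOFS =====
theorem pvALoop_eq (fe : List (List (String × String)))
    (hpre : ∀ e ∈ fe, (pvLookupFilename e).isSome = true) (acc : Int) :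
    pvALoop fe acc =
      if fe.any pvIsAdmin then 3 else if fe.any pvIsUser then 2 else acc := by
  induction fe generalizing acc with
  | nil => simp [pvALoop]
  | cons e rest ih =>
    have he : (pvLookupFilename e).isSome = true := hpre e (by simp)
    have hrest : ∀ x ∈ rest, (pvLookupFilename x).isSome = true :=
      fun x hx => hpre x (by simp [hx])
    obtain ⟨f, hf⟩ := Option.isSome_iff_exists.mp he
    by_cases hA : f = "escalate.sh, escalate.exe"
    · simp [pvALoop, hf, hA, List.any_cons, pvIsAdmin]
    · by_cases hU : f = "cmd.sh, cmd.exe"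
      · simp only [pvALoop, hf, List.mem_singleton, hA, if_false, hU, if_true,
          List.any_cons, pvIsAdmin, pvIsUser]
        rw [ih hrest]
        simp [hf, hA]
      · simp only [pvALoop, hf, List.mem_singleton, hA, hU, if_false,
          List.any_cons, pvIsAdmin, pvIsUser]
        rw [ih hrest]
        simp [hA, hU]

-- ===== VERDICT (by name: the statement is the Claim_ definition above) =====
theorem check_files_py_spec : Claim_equal_check_files_py := by
  intro fe _ hpre
  unfold Spec_check_files_py check_files_py check_files_py_alt
  rw [pvALoop_eq fe hpre 0]
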